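-- pv_equiv track=rewrite | github.com/tarungattu/JobShopGA | paper_prog.py | srt_heuristic
-- ===== SOURCE A (Python) =====
-- m = 4
--
-- def srt_heuristic(operation_data):
--     rem_time = 0
--     job_rem_time = []
--     operation_index_list = []
--
--     for i in range(m):
--         job_rem_time = []
--         for job in operation_data:
--             rem_time = 0
--             tjob = job[i:]
--             for operation in tjob:
--                 rem_time += operation[1]
--             job_rem_time.append(rem_time)
--         sorted_indices = sorted(range(len(job_rem_time)), key=lambda x: job_rem_time[x])
--         operation_index_list.extend(sorted_indices)
--
--
--     return operation_index_list
-- ===== SOURCE B (Python) =====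
-- m = 4
--
-- def srt_heuristic(operation_data):
--     # Precompute per-job suffix sums of durations once, then just look them up.
--     suffixes = []
--     for job in operation_data:
--         s = [0]
--         for op in reversed(job):
--             s = [op[1] + s[0]] + s
--         suffixes.append(s)
--     out = []
--     for i in range(m):
--         vals = [s[i] if i < len(s) else 0 for s in suffixes]
--         out.extend(sorted(range(len(vals)), key=lambda x: vals[x]))
--     return out
-- ===== Notes on version B (the rewrite author's own statement) =====
-- stated objective: alternative
-- what changed: Instead of re-summing job[i:] from scratch for every machine index i, B precomputes for each job a suffix-sum table (built right-to-left once) and each of the m rounds just looks up table[i], then stably sorts the job indices by those values.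
import Mathlib
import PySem

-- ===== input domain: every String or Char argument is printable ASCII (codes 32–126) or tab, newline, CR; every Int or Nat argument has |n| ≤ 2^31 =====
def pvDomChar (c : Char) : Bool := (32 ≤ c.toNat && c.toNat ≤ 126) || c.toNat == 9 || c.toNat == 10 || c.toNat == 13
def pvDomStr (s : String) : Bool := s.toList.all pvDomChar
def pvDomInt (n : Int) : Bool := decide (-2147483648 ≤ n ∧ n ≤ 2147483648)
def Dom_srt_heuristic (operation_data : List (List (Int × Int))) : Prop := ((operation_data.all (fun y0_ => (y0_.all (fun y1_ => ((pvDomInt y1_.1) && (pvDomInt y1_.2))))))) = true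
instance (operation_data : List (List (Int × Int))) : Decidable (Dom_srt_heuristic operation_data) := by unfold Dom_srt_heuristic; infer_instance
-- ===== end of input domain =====

-- B replaces A's per-machine re-summation of job[i:] by a per-job suffix-sum table built once
-- (objective: alternative decomposition; same results, constant-factor trade only since m = 4).

-- ===== PORT A =====
-- literal transliteration of A: for each i in range(4), re-sum job[i:] per job, argsort, extend
def srt_heuristic (operation_data : List (List (Int × Int))) : List Int :=
  (PySem.List.pyRange 0 4 1).foldl (fun operation_index_list i =>
    let job_rem_time : List Int :=
      operation_data.foldl (fun jrt job =>
        jrt ++ [(PySem.List.slice job (some i) none).foldl (fun rem_time operation => rem_time + operation.2) 0]) []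
    let sorted_indices :=
      PySem.List.sorted (PySem.List.pyRange 0 (job_rem_time.length : Int) 1)
        (fun x => PySem.List.pyGetD job_rem_time x 0) false
    operation_index_list ++ sorted_indices) []

-- ===== PORT B =====
-- literal transliteration of B: suffix tables once (right-to-left cons loop), then lookups + argsort
def srt_heuristic_alt (operation_data : List (List (Int × Int))) : List Int :=
  let suffixes : List (List Int) :=
    operation_data.foldl (fun acc job =>
      acc ++ [job.foldr (fun op s => (op.2 + s.headI) :: s) [0]]) []
  (PySem.List.pyRange 0 4 1).foldl (fun out i =>
    let vals : List Int :=
      suffixes.map (fun s => if i < (s.length : Int) then PySem.List.pyGetD s i 0 else 0)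
    out ++ PySem.List.sorted (PySem.List.pyRange 0 (vals.length : Int) 1)
      (fun x => PySem.List.pyGetD vals x 0) false) []

-- ===== PRECONDITION & SPEC =====
def Spec_srt_heuristic (operation_data : List (List (Int × Int))) (out : List Int) : Prop := out = srt_heuristic_alt operation_data
instance (operation_data : List (List (Int × Int))) (out : List Int) : Decidable (Spec_srt_heuristic operation_data out) := by unfold Spec_srt_heuristic; infer_instance

-- ===== CLAIM (what is proved, stated in full; the proofs are below) =====
def Claim_equal_srt_heuristic : Prop := ∀ (operation_data : List (List (Int × Int))), Dom_srt_heuristic operation_data → Spec_srt_heuristic operation_data (srt_heuristic operation_data)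

-- ===== LEMMAS AND PROOFS =====

-- the suffix table of B, as a standalone abbreviation for the lemmas
def pvSuffix (job : List (Int × Int)) : List Int :=
  job.foldr (fun op s => (op.2 + s.headI) :: s) [0]

theorem pvSuffix_ne_nil (job : List (Int × Int)) : pvSuffix job ≠ [] := by
  cases job <;> simp [pvSuffix]

-- core fact: summing job[n:] left-to-right equals looking up the suffix table at n (default 0)
theorem sum_drop_eq_suffix_getD (job : List (Int × Int)) (n : Nat) :
    (job.drop n).foldl (fun r op => r + op.2) 0 = (pvSuffix job).getD n 0 := by
  induction job generalizing n with
  | nil => cases n <;> simp [pvSuffix]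
  | cons op t ih =>
    cases n with
    | zero =>
      have h0 := ih 0
      simp only [List.drop_zero] at h0 ⊢
      rw [List.foldl_cons, PySem.List.foldl_add t (fun op => op.2) (0 + op.2)]
      have hh : (pvSuffix t).headI = (pvSuffix t).getD 0 0 := by
        cases hse : pvSuffix t with
        | nil => exact absurd hse (pvSuffix_ne_nil t)
        | cons a b => simp
      have hsum : (t.map (fun op => op.2)).sum = (pvSuffix t).getD 0 0 := by
        rw [← h0, PySem.List.foldl_add t (fun op => op.2) 0, zero_add]
      have hcons : pvSuffix (op :: t) = (op.2 + (pvSuffix t).headI) :: pvSuffix t := rfl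
      rw [hcons, PySem.List.foldl_add t (fun op => op.2) 0, hh] at *
      simp [hsum]
    | succ k =>
      simpa [pvSuffix] using ih k

-- lookup rewrite: B's guarded table lookup equals A's suffix sum, for 0 ≤ i
theorem lookup_eq_sum (job : List (Int × Int)) (i : Int) (hi : 0 ≤ i) :
    (if i < ((pvSuffix job).length : Int) then PySem.List.pyGetD (pvSuffix job) i 0 else 0)
      = (PySem.List.slice job (some i) none).foldl (fun r op => r + op.2) 0 := by
  rw [PySem.List.slice_from job hi, sum_drop_eq_suffix_getD]
  by_cases h : i < ((pvSuffix job).length : Int)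
  · rw [if_pos h, PySem.List.pyGetD_of_nonneg _ _ hi]
  · rw [if_neg h, List.getD_eq_default]
    omega

theorem srt_heuristic_spec : Claim_equal_srt_heuristic := by
  intro od _
  unfold Spec_srt_heuristic srt_heuristic srt_heuristic_alt
  rw [PySem.List.foldl_append_singleton_eq_map]
  simp only [List.nil_append]
  apply PySem.List.foldl_congr_mem
  intro acc i hi
  have hi0 : 0 ≤ i := (PySem.List.mem_pyRange_one.mp hi).1
  have hvals :
      (od.map (fun job => pvSuffix job)).map
          (fun s => if i < (s.length : Int) then PySem.List.pyGetD s i 0 else 0)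
        = od.foldl (fun jrt job =>
            jrt ++ [(PySem.List.slice job (some i) none).foldl (fun r op => r + op.2) 0]) [] := by
    rw [PySem.List.foldl_append_singleton_eq_map, List.nil_append, List.map_map]
    exact List.map_congr_left (fun job _ => lookup_eq_sum job i hi0)
  simp only [pvSuffix] at hvals
  rw [hvals]
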